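-- pv_equiv track=rewrite | github.com/ratem/bart.dias | tests/examples/pipeline/nested_pipeline.py | nested_data_processing
-- ===== SOURCE A (Python) =====
-- def nested_data_processing(data):
--     # Outer pipeline stage
--     intermediate = []
--     for item in data:
--         # Inner pipeline stage 1
--         temp = item * 2
--
--         # Inner pipeline stage 2
--         temp += 10
--
--         intermediate.append(temp)
--
--     # Final processing stage
--     results = []
--     for val in intermediate:
--         results.append(val ** 2)
--
--     return results
-- ===== SOURCE B (Python) =====
-- def nested_data_processing(data):
--     # single fused pass: compose double, add ten, square per element
--     return [(item * 2 + 10) ** 2 for item in data]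
-- ===== Notes on version B (the rewrite author's own statement) =====
-- stated objective: simpler
-- what changed: Fuses A's two sequential passes (transform list, then square list) into one comprehension computing the composed value per element, with no intermediate list.
import Mathlib
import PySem

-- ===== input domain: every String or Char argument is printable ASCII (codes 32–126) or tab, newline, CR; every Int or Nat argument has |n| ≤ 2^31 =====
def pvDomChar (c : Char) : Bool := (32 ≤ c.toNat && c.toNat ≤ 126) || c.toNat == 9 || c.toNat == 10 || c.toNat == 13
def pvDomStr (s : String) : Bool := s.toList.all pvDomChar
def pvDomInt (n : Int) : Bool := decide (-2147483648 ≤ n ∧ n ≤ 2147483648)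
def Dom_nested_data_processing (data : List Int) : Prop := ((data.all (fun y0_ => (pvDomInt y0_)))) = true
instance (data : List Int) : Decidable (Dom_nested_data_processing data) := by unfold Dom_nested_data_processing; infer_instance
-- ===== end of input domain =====

-- ===== PORT A =====
def nested_data_processing (data : List Int) : List Int :=
  let intermediate := data.foldl (fun acc item =>
    let temp := item * 2
    let temp := temp + 10
    acc ++ [temp]) []
  let results := intermediate.foldl (fun acc val => acc ++ [val ^ 2]) []
  results

-- ===== PORT B =====
def nested_data_processing_alt (data : List Int) : List Int :=
  data.map (fun item => (item * 2 + 10) ^ 2)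

-- ===== PRECONDITION & SPEC =====
def Spec_nested_data_processing (data : List Int) (out : List Int) : Prop := out = nested_data_processing_alt data
instance (data : List Int) (out : List Int) : Decidable (Spec_nested_data_processing data out) := by unfold Spec_nested_data_processing; infer_instance

-- ===== CLAIM (what is proved, stated in full; the proofs are below) =====
def Claim_equal_nested_data_processing : Prop := ∀ (data : List Int), Dom_nested_data_processing data → Spec_nested_data_processing data (nested_data_processing data)

-- ===== LEMMAS AND PROOFS =====
theorem foldl_append_singleton_map {α β : Type} (f : α → β) (xs : List α) (acc : List β) :
    xs.foldl (fun a x => a ++ [f x]) acc = acc ++ xs.map f := by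
  induction xs generalizing acc with
  | nil => simp
  | cons x xs ih => simp [List.foldl, ih]

-- ===== VERDICT (by name: the statement is the Claim_ definition above) =====
theorem nested_data_processing_spec : Claim_equal_nested_data_processing := by
  intro data _
  unfold Spec_nested_data_processing nested_data_processing nested_data_processing_alt
  simp only [foldl_append_singleton_map]
  simp [List.map_map]
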